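-- pv_equiv track=rewrite | github.com/ykdy3951/codetree-TILs | 241219/독서실의 거리두기 4/study-cafe-keeping-distance-4.py | max_distance_two_people
-- ===== SOURCE A (Python) =====
-- def max_distance_two_people(N, seats):
--     def calculate_min_distance(seats):
--         min_dist = float('inf')
--         last_filled = -1
--
--         for i in range(N):
--             if seats[i] == 1:
--                 if last_filled != -1:
--                     min_dist = min(min_dist, i - last_filled)
--                 last_filled = i
--
--         return min_dist
--
--     max_min_distance = 0
--
--     for i in range(N):
--         if seats[i] == 0:
--             seats[i] = 1
--             for j in range(i + 1, N):
--                 if seats[j] == 0: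
--                     seats[j] = 1
--                     current_min_distance = calculate_min_distance(seats)
--                     max_min_distance = max(max_min_distance, current_min_distance)
--                     seats[j] = 0
--             seats[i] = 0
--
--     return max_min_distance
-- ===== SOURCE B (Python) =====
-- def _insert_sorted(xs, v):
--     out = []
--     k = 0
--     while k < len(xs) and xs[k] < v:
--         out.append(xs[k])
--         k += 1
--     out.append(v)
--     return out + xs[k:]
--
--
-- def _min_gap(w):
--     best = w[1] - w[0]
--     prev = w[1]
--     for b in w[2:]:
--         if b - prev < best:
--             best = b - prev
--         prev = b
--     return best
--
--
-- def max_distance_two_people(N, seats):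
--     ones = [k for k in range(N) if seats[k] == 1]
--     free = [k for k in range(N) if seats[k] == 0]
--     best = 0
--     rest = free
--     while rest:
--         i = rest[0]
--         rest = rest[1:]
--         wi = _insert_sorted(ones, i)
--         for j in rest:
--             d = _min_gap(_insert_sorted(wi, j))
--             if d > best:
--                 best = d
--     return best
-- ===== Notes on version B (the rewrite author's own statement) =====
-- stated objective: alternative
-- what changed: B precomputes the sorted list of occupied positions and the list of empty positions once; for each pair of empty seats it inserts the two indices into the occupied-positions list and takes the minimum of adjacent differences, instead of A's re-scan of the whole seat array with a last-filled state for every pair.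
import Mathlib
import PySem

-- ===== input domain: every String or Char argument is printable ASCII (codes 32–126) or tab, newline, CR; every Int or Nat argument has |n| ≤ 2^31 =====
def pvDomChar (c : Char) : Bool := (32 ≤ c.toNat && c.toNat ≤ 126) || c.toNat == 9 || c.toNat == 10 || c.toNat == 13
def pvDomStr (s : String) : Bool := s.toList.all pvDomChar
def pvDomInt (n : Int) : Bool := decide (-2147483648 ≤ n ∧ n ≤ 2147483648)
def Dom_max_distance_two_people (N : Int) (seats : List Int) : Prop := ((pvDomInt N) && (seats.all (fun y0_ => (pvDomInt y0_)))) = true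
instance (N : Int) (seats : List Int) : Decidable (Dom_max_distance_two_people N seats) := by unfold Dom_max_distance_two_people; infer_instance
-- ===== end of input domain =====

-- B replaces A's per-pair rescan of the whole seat array by one precomputed occupied-positions
-- list into which the two chosen empty seats are inserted (objective: alternative algorithm).
-- A mutates `seats` in place but restores it before returning; the ports are pure and the claim
-- is about the return value.

-- ===== PORT A =====
-- min over an "inf-or-int" accumulator: min(float('inf'), x) = x
def pvOMin (m : Option Int) (v : Int) : Int :=
  match m with
  | none => v
  | some m => min m v

-- calculate_min_distance: scan seats[0..N-1], min gap between consecutive 1s (none = float('inf'))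
def pvCalcMin (N : Int) (seats : List Int) : Option Int :=
  ((PySem.List.pyRange 0 N 1).foldl
    (fun (st : Option Int × Int) i =>
      if PySem.List.pyGetD seats i 0 = 1 then
        ((if st.2 ≠ -1 then some (pvOMin st.1 (i - st.2)) else st.1), i)
      else st)
    (none, -1)).1

def max_distance_two_people (N : Int) (seats : List Int) : Int :=
  (PySem.List.pyRange 0 N 1).foldl
    (fun acc i =>
      if PySem.List.pyGetD seats i 0 = 0 then
        let s1 := PySem.List.pySetD seats i 1      -- seats[i] = 1
        (PySem.List.pyRange (i + 1) N 1).foldl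
          (fun acc2 j =>
            if PySem.List.pyGetD s1 j 0 = 0 then
              let s2 := PySem.List.pySetD s1 j 1   -- seats[j] = 1
              match pvCalcMin N s2 with
              | some c => max acc2 c
              | none => acc2                       -- unreachable: s2 holds two occupied seats
            else acc2)
          acc
      else acc)
    0

-- ===== PORT B =====
-- _insert_sorted: copy the elements < v, then v, then the rest
def pvInsertSorted (xs : List Int) (v : Int) : List Int :=
  match xs with
  | [] => [v]
  | x :: t => if x < v then x :: pvInsertSorted t v else v :: x :: t

-- _min_gap's loop over w[2:] with state (best, prev)
def pvMinGapLoop (best prev : Int) : List Int → Int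
  | [] => best
  | b :: t => pvMinGapLoop (if b - prev < best then b - prev else best) b t

def pvMinGap (w : List Int) : Int :=
  match w with
  | a :: b :: t => pvMinGapLoop (b - a) b t
  | _ => 0                                         -- unreachable: w always has ≥ 2 elements

-- the while-loop over the free list (rest shrinks by one per step)
def pvAltLoop (ones : List Int) (best : Int) : List Int → Int
  | [] => best
  | i :: rest =>
    let wi := pvInsertSorted ones i
    pvAltLoop ones
      (rest.foldl (fun b j =>
        let d := pvMinGap (pvInsertSorted wi j)
        if d > b then d else b) best)
      rest

def max_distance_two_people_alt (N : Int) (seats : List Int) : Int :=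
  let ones := (PySem.List.pyRange 0 N 1).filter (fun k => decide (PySem.List.pyGetD seats k 0 = 1))
  let free := (PySem.List.pyRange 0 N 1).filter (fun k => decide (PySem.List.pyGetD seats k 0 = 0))
  pvAltLoop ones 0 free

-- ===== PRECONDITION & SPEC =====
-- A reads seats[i] for every i in range(N): IndexError exactly when N > len(seats); nothing else raises.
def Pre_max_distance_two_people (N : Int) (seats : List Int) : Prop := N ≤ (seats.length : Int)
instance (N : Int) (seats : List Int) : Decidable (Pre_max_distance_two_people N seats) := by
  unfold Pre_max_distance_two_people; infer_instance

def pvWitness_max_distance_two_people : Int × List Int := (4, [0, 1, 0, 0])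

def Spec_max_distance_two_people (N : Int) (seats : List Int) (out : Int) : Prop := out = max_distance_two_people_alt N seats
instance (N : Int) (seats : List Int) (out : Int) : Decidable (Spec_max_distance_two_people N seats out) := by unfold Spec_max_distance_two_people; infer_instance

-- ===== CLAIM (what is proved, stated in full; the proofs are below) =====
def Claim_equal_max_distance_two_people : Prop := ∀ (N : Int) (seats : List Int), Dom_max_distance_two_people N seats → Pre_max_distance_two_people N seats → Spec_max_distance_two_people N seats (max_distance_two_people N seats)

-- ===== LEMMAS AND PROOFS =====

-- proof-side vocabulary
def pvDiffs : List Int → List Int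
  | a :: b :: t => (b - a) :: pvDiffs (b :: t)
  | _ => []

def pvMinO (D : List Int) : Option Int :=
  D.foldl (fun m d => some (pvOMin m d)) none

def pvOnesOf (N : Int) (s : List Int) : List Int :=
  (PySem.List.pyRange 0 N 1).filter (fun k => decide (PySem.List.pyGetD s k 0 = 1))

def pvLastD (l : List Int) : Int := l.getLast?.getD (-1)


-- pvMinO over a snoc
theorem pvMinO_append (D : List Int) (d : Int) :
    pvMinO (D ++ [d]) = some (pvOMin (pvMinO D) d) := by
  simp [pvMinO, List.foldl_append]

-- pvDiffs over a snoc (nonempty list)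
theorem pvDiffs_append (x : Int) : ∀ (a : Int) (t : List Int),
    pvDiffs ((a :: t) ++ [x]) = pvDiffs (a :: t) ++ [x - pvLastD (a :: t)] := by
  intro a t
  induction t generalizing a with
  | nil => simp [pvDiffs, pvLastD]
  | cons b t ih =>
    have h := ih b
    simp only [List.cons_append] at h ⊢
    rw [show pvDiffs (a :: b :: (t ++ [x])) = (b - a) :: pvDiffs (b :: (t ++ [x])) from rfl, h,
        show pvDiffs (a :: b :: t) = (b - a) :: pvDiffs (b :: t) from rfl]
    simp [pvLastD, List.getLast?_cons_cons]

-- every occupied position is ≥ 0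
theorem pvOnesOf_nonneg (N : Int) (s : List Int) : ∀ x ∈ pvOnesOf N s, 0 ≤ x := by
  intro x hx
  unfold pvOnesOf at hx
  have := List.of_mem_filter hx
  have hm := List.mem_of_mem_filter hx
  have := (PySem.List.mem_pyRange_one).1 hm
  omega

-- nonempty filtered lists have a last element that belongs to them
theorem pvLastD_mem (l : List Int) (a : Int) (t : List Int) (h : l = a :: t) : pvLastD l ∈ l := by
  subst h
  unfold pvLastD
  rw [List.getLast?_eq_some_getLast (l := a :: t) (by simp)]
  exact List.getLast_mem _

theorem pvScanNat (s : List Int) : ∀ (n : Nat),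
    (PySem.List.pyRange 0 (n : Int) 1).foldl
      (fun (st : Option Int × Int) i =>
        if PySem.List.pyGetD s i 0 = 1 then
          ((if st.2 ≠ -1 then some (pvOMin st.1 (i - st.2)) else st.1), i)
        else st)
      (none, -1)
    = (pvMinO (pvDiffs (pvOnesOf (n : Int) s)), pvLastD (pvOnesOf (n : Int) s)) := by
  intro n
  induction n with
  | zero =>
    rw [show ((0 : Nat) : Int) = 0 from rfl, PySem.List.pyRange_one_eq_nil (by omega)]
    unfold pvOnesOf
    rw [PySem.List.pyRange_one_eq_nil (by omega)]
    rfl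
  | succ n ih =>
    have hc : ((n + 1 : Nat) : Int) = (n : Int) + 1 := by push_cast; ring
    have hsplit : PySem.List.pyRange 0 ((n + 1 : Nat) : Int) 1
        = PySem.List.pyRange 0 (n : Int) 1 ++ [(n : Int)] := by
      rw [hc]; exact PySem.List.pyRange_one_succ_right (by positivity)
    have hones : pvOnesOf ((n + 1 : Nat) : Int) s
        = pvOnesOf (n : Int) s
          ++ (if PySem.List.pyGetD s (n : Int) 0 = 1 then [(n : Int)] else []) := by
      unfold pvOnesOf
      rw [hsplit, List.filter_append]
      congr 1
      by_cases hp : PySem.List.pyGetD s (n : Int) 0 = 1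
      · rw [if_pos hp]
        show List.filter _ [(n : Int)] = _
        rw [List.filter_cons, if_pos (by simpa using hp)]
        rfl
      · rw [if_neg hp]
        show List.filter _ [(n : Int)] = _
        rw [List.filter_cons, if_neg (by simpa using hp)]
        rfl
    rw [hsplit, List.foldl_append, ih, hones]
    by_cases hp : PySem.List.pyGetD s (n : Int) 0 = 1
    · rw [if_pos hp]
      simp only [List.foldl_cons, List.foldl_nil, if_pos hp]
      rcases hl : pvOnesOf (n : Int) s with _ | ⟨a, t⟩
      · simp [pvLastD, pvDiffs, pvMinO]
      · have hmem : pvLastD (pvOnesOf (n : Int) s) ∈ pvOnesOf (n : Int) s :=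
          pvLastD_mem _ a t hl
        have hnn : 0 ≤ pvLastD (pvOnesOf (n : Int) s) := pvOnesOf_nonneg _ _ _ hmem
        rw [hl] at hnn
        rw [if_pos (show pvLastD (a :: t) ≠ -1 by omega)]
        rw [pvDiffs_append (n : Int) a t, pvMinO_append, Prod.mk.injEq]
        refine ⟨rfl, ?_⟩
        unfold pvLastD
        rw [List.getLast?_concat]
        rfl
    · rw [if_neg hp]
      simp only [List.foldl_cons, List.foldl_nil, if_neg hp, List.append_nil]

-- A's scan over seats[0..N-1] computes (min of consecutive gaps, last occupied position)
theorem pvScan (s : List Int) (N : Int) :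
    (PySem.List.pyRange 0 N 1).foldl
      (fun (st : Option Int × Int) i =>
        if PySem.List.pyGetD s i 0 = 1 then
          ((if st.2 ≠ -1 then some (pvOMin st.1 (i - st.2)) else st.1), i)
        else st)
      (none, -1)
    = (pvMinO (pvDiffs (pvOnesOf N s)), pvLastD (pvOnesOf N s)) := by
  by_cases hN : N ≤ 0
  · rw [PySem.List.pyRange_one_eq_nil hN]
    unfold pvOnesOf
    rw [PySem.List.pyRange_one_eq_nil hN]
    rfl
  · have hN' : N = ((N.toNat : Nat) : Int) := by omega
    rw [hN']
    exact pvScanNat s N.toNat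

theorem pvCalcMin_eq (N : Int) (s : List Int) :
    pvCalcMin N s = pvMinO (pvDiffs (pvOnesOf N s)) := by
  unfold pvCalcMin
  rw [pvScan]

-- the _min_gap loop is a fold of `min` over the consecutive differences
theorem pvMinGapLoop_foldl : ∀ (t : List Int) (best prev : Int),
    pvMinGapLoop best prev t = (pvDiffs (prev :: t)).foldl min best := by
  intro t
  induction t with
  | nil => intro best prev; simp [pvMinGapLoop, pvDiffs]
  | cons b t ih =>
    intro best prev
    simp only [pvMinGapLoop, pvDiffs, List.foldl_cons]
    rw [ih]
    congr 1
    omega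

theorem pvMinO_foldl_some : ∀ (D : List Int) (x : Int),
    D.foldl (fun m d => some (pvOMin m d)) (some x) = some (D.foldl min x) := by
  intro D
  induction D with
  | nil => intro x; rfl
  | cons d D ih =>
    intro x
    rw [List.foldl_cons, List.foldl_cons]
    exact ih (min x d)

theorem pvMinGap_eq (a b : Int) (t : List Int) :
    pvMinO (pvDiffs (a :: b :: t)) = some (pvMinGap (a :: b :: t)) := by
  have h1 : pvMinGap (a :: b :: t) = (pvDiffs (b :: t)).foldl min (b - a) :=
    pvMinGapLoop_foldl t (b - a) b
  rw [h1]
  show List.foldl (fun m d => some (pvOMin m d)) none ((b - a) :: pvDiffs (b :: t)) = _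
  rw [List.foldl_cons]
  exact pvMinO_foldl_some _ _

-- inserting below every element puts v in front
theorem pvInsertSorted_all_gt (v : Int) : ∀ (l : List Int), (∀ x ∈ l, v < x) →
    pvInsertSorted l v = v :: l := by
  intro l h
  cases l with
  | nil => rfl
  | cons x t =>
    have := h x (by simp)
    simp [pvInsertSorted, show ¬ x < v by omega]

theorem pvInsertSorted_length (v : Int) : ∀ (l : List Int),
    (pvInsertSorted l v).length = l.length + 1 := by
  intro l
  induction l with
  | nil => rfl
  | cons x t ih => simp only [pvInsertSorted]; split <;> simp [ih]

-- filtering with an extra allowed element v ∈ r (strictly increasing r) = ordered insertion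
theorem pvFilter_insert (v : Int) (q : Int → Bool) (hqv : q v = false) :
    ∀ (r : List Int), r.Pairwise (· < ·) → v ∈ r →
    r.filter (fun k => (k == v) || q k) = pvInsertSorted (r.filter q) v := by
  intro r
  induction r with
  | nil => intro _ hv; simp at hv
  | cons a t ih =>
    intro hpw hv
    obtain ⟨hlt, hpw'⟩ := List.pairwise_cons.1 hpw
    by_cases hav : a = v
    · subst hav
      have hfilt : t.filter (fun k => (k == a) || q k) = t.filter q := by
        apply List.filter_congr
        intro x hx
        have hxa : (x == a) = false := by
          have := hlt x hx; simp; omega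
        simp [hxa]
      have hq : ((a == a) || q a) = true := by simp
      rw [List.filter_cons, if_pos hq, hfilt, List.filter_cons, if_neg (by simp [hqv])]
      rw [pvInsertSorted_all_gt a (t.filter q) (fun x hx => hlt x (List.mem_of_mem_filter hx))]
    · have hvt : v ∈ t := by cases hv with
        | head => exact absurd rfl hav
        | tail _ h => exact h
      have hva : a < v := hlt v hvt
      have hbe : (a == v) = false := by simp [hav]
      rw [List.filter_cons, List.filter_cons]
      by_cases hqa : q a = true
      · rw [if_pos (by simp [hbe, hqa]), if_pos hqa, ih hpw' hvt]
        show _ = pvInsertSorted (a :: t.filter q) v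
        rw [show pvInsertSorted (a :: t.filter q) v
              = a :: pvInsertSorted (t.filter q) v by simp [pvInsertSorted, hva]]
      · rw [if_neg (by simp [hbe, hqa]), if_neg hqa, ih hpw' hvt]

-- reading a modified seat list
theorem pvGetSet (s : List Int) (i k : Int) (x : Int)
    (hi0 : 0 ≤ i) (hil : i < (s.length : Int)) (hk0 : 0 ≤ k) (_hkl : k < (s.length : Int)) :
    PySem.List.pyGetD (PySem.List.pySetD s i x) k 0 = if k = i then x else PySem.List.pyGetD s k 0 := by
  have hi : i = ((i.toNat : Nat) : Int) := by omega
  have hk : k = ((k.toNat : Nat) : Int) := by omega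
  rw [hi, hk, PySem.List.pyGetD_pySetD_natCast s i.toNat k.toNat x 0 (by omega)]
  by_cases h : k.toNat = i.toNat
  · simp [h]
  · rw [if_neg h, if_neg (by exact_mod_cast h)]

-- occupied positions after seating at free i < j: two ordered insertions
theorem pvOnes_set2 (seats : List Int) (N i j : Int)
    (hlen : N ≤ (seats.length : Int)) (hi0 : 0 ≤ i) (hij : i < j) (hjN : j < N)
    (hsi : PySem.List.pyGetD seats i 0 = 0) (hsj : PySem.List.pyGetD seats j 0 = 0) :
    pvOnesOf N (PySem.List.pySetD (PySem.List.pySetD seats i 1) j 1)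
      = pvInsertSorted (pvInsertSorted (pvOnesOf N seats) i) j := by
  have hlen1 : ((PySem.List.pySetD seats i 1).length : Int) = (seats.length : Int) := by
    rw [PySem.List.length_pySetD]
  have hcong : pvOnesOf N (PySem.List.pySetD (PySem.List.pySetD seats i 1) j 1)
      = (PySem.List.pyRange 0 N 1).filter
          (fun k => (k == j) || ((k == i) || decide (PySem.List.pyGetD seats k 0 = 1))) := by
    unfold pvOnesOf
    apply List.filter_congr
    intro k hk
    have hk' := (PySem.List.mem_pyRange_one).1 hk
    rw [pvGetSet (PySem.List.pySetD seats i 1) j k 1 (by omega) (by omega) (by omega) (by omega)]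
    by_cases hkj : k = j
    · subst hkj; simp
    · rw [if_neg hkj]
      rw [pvGetSet seats i k 1 (by omega) (by omega) (by omega) (by omega)]
      by_cases hki : k = i
      · subst hki
        rw [if_pos rfl]
        have h1 : (k == j) = false := by simp [hkj]
        simp [h1]
      · rw [if_neg hki]
        have h1 : (k == j) = false := by simp [hkj]
        have h2 : (k == i) = false := by simp [hki]
        simp [h1, h2]
  rw [hcong]
  rw [pvFilter_insert j (fun k => (k == i) || decide (PySem.List.pyGetD seats k 0 = 1))
        (by simp [hsj]; omega)
        (PySem.List.pyRange 0 N 1) (PySem.List.pairwise_lt_pyRange_one 0 N)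
        ((PySem.List.mem_pyRange_one).2 (by omega))]
  rw [pvFilter_insert i (fun k => decide (PySem.List.pyGetD seats k 0 = 1))
        (by simp [hsi])
        (PySem.List.pyRange 0 N 1) (PySem.List.pairwise_lt_pyRange_one 0 N)
        ((PySem.List.mem_pyRange_one).2 (by omega))]
  rfl

-- decomposing a filtered range at its head
theorem pvFilterRange_cons (p : Int → Bool) : ∀ (n : Nat) (a N i : Int) (rest : List Int),
    (N - a).toNat = n →
    (PySem.List.pyRange a N 1).filter p = i :: rest →
    a ≤ i ∧ i < N ∧ p i = true ∧ rest = (PySem.List.pyRange (i + 1) N 1).filter p := by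
  intro n
  induction n using Nat.strong_induction_on with
  | _ n ih =>
    intro a N i rest hn hf
    by_cases haN : a < N
    · rw [PySem.List.pyRange_one_cons haN, List.filter_cons] at hf
      by_cases hpa : p a = true
      · rw [if_pos hpa] at hf
        injection hf with h1 h2
        subst h1; subst h2
        exact ⟨le_refl _, haN, hpa, rfl⟩
      · rw [if_neg hpa] at hf
        have := ih (N - (a + 1)).toNat (by omega) (a + 1) N i rest rfl hf
        exact ⟨by omega, this.2.1, this.2.2.1, this.2.2.2⟩
    · rw [PySem.List.pyRange_one_eq_nil (by omega)] at hf
      simp at hf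

-- the per-pair value A computes equals the per-pair value B computes
theorem pvPairValue (seats : List Int) (N i j : Int) (acc : Int)
    (hlen : N ≤ (seats.length : Int)) (hi0 : 0 ≤ i) (hij : i < j) (hjN : j < N)
    (hsi : PySem.List.pyGetD seats i 0 = 0) (hsj : PySem.List.pyGetD seats j 0 = 0) :
    (match pvCalcMin N (PySem.List.pySetD (PySem.List.pySetD seats i 1) j 1) with
      | some c => max acc c
      | none => acc)
    = (if pvMinGap (pvInsertSorted (pvInsertSorted (pvOnesOf N seats) i) j) > acc
        then pvMinGap (pvInsertSorted (pvInsertSorted (pvOnesOf N seats) i) j) else acc) := by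
  rw [pvCalcMin_eq, pvOnes_set2 seats N i j hlen hi0 hij hjN hsi hsj]
  have hlen2 : (pvInsertSorted (pvInsertSorted (pvOnesOf N seats) i) j).length
      = (pvOnesOf N seats).length + 2 := by
    rw [pvInsertSorted_length, pvInsertSorted_length]
  obtain ⟨a, w1, hw⟩ :=
    List.exists_cons_of_ne_nil (l := pvInsertSorted (pvInsertSorted (pvOnesOf N seats) i) j)
      (by intro h; rw [h] at hlen2; simp at hlen2)
  have hw1len : w1.length = (pvOnesOf N seats).length + 1 := by
    rw [hw] at hlen2; simpa using hlen2
  obtain ⟨b, t, hw1⟩ :=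
    List.exists_cons_of_ne_nil (l := w1)
      (by intro h; rw [h] at hw1len; simp at hw1len)
  subst hw1
  rw [hw, pvMinGap_eq]
  show max acc (pvMinGap (a :: b :: t)) = _
  by_cases hgt : pvMinGap (a :: b :: t) > acc
  · rw [if_pos hgt]; omega
  · rw [if_neg hgt]; omega

theorem pvAltLoop_cons (ones : List Int) (best i : Int) (rest : List Int) :
    pvAltLoop ones best (i :: rest)
      = pvAltLoop ones
          (rest.foldl
            (fun b j =>
              let d := pvMinGap (pvInsertSorted (pvInsertSorted ones i) j)
              if d > b then d else b)
            best)
          rest := rfl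

-- A's inner loop over j (with seats[i] := 1) = B's fold over the free seats after i
theorem pvInner (seats : List Int) (N i : Int) (hlen : N ≤ (seats.length : Int))
    (hi0 : 0 ≤ i) (hiN : i < N) (hsi : PySem.List.pyGetD seats i 0 = 0) (acc : Int) :
    (PySem.List.pyRange (i + 1) N 1).foldl
      (fun acc2 j =>
        if PySem.List.pyGetD (PySem.List.pySetD seats i 1) j 0 = 0 then
          match pvCalcMin N (PySem.List.pySetD (PySem.List.pySetD seats i 1) j 1) with
          | some c => max acc2 c
          | none => acc2
        else acc2)
      acc
    = ((PySem.List.pyRange (i + 1) N 1).filter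
        (fun k => decide (PySem.List.pyGetD seats k 0 = 0))).foldl
        (fun b j =>
          let d := pvMinGap (pvInsertSorted (pvInsertSorted (pvOnesOf N seats) i) j)
          if d > b then d else b)
        acc := by
  have h1 := PySem.List.foldl_congr_mem (PySem.List.pyRange (i + 1) N 1)
    (fun acc2 j =>
      if PySem.List.pyGetD (PySem.List.pySetD seats i 1) j 0 = 0 then
        match pvCalcMin N (PySem.List.pySetD (PySem.List.pySetD seats i 1) j 1) with
        | some c => max acc2 c
        | none => acc2
      else acc2)
    (fun acc2 j =>
      if PySem.List.pyGetD seats j 0 = 0 then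
        (let d := pvMinGap (pvInsertSorted (pvInsertSorted (pvOnesOf N seats) i) j)
         if d > acc2 then d else acc2)
      else acc2)
    acc
    (by
      intro acc2 j hj
      beta_reduce
      have hj' := (PySem.List.mem_pyRange_one).1 hj
      have hguard : PySem.List.pyGetD (PySem.List.pySetD seats i 1) j 0
          = PySem.List.pyGetD seats j 0 := by
        rw [pvGetSet seats i j 1 hi0 (by omega) (by omega) (by omega), if_neg (by omega)]
      rw [hguard]
      by_cases hpj : PySem.List.pyGetD seats j 0 = 0
      · rw [if_pos hpj, if_pos hpj]
        exact pvPairValue seats N i j acc2 hlen hi0 (by omega) (by omega) hsi hpj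
      · rw [if_neg hpj, if_neg hpj])
  rw [h1]
  exact PySem.List.foldl_ite_eq_foldl_filter
    (fun j => PySem.List.pyGetD seats j 0 = 0)
    (fun b j =>
      let d := pvMinGap (pvInsertSorted (pvInsertSorted (pvOnesOf N seats) i) j)
      if d > b then d else b)
    (PySem.List.pyRange (i + 1) N 1) acc

-- the nested pair loops agree
theorem pvMainLoop (seats : List Int) (N : Int) (hlen : N ≤ (seats.length : Int)) :
    ∀ (n : Nat) (a : Int), 0 ≤ a → (N - a).toNat = n → ∀ (acc : Int),
    ((PySem.List.pyRange a N 1).filter (fun k => decide (PySem.List.pyGetD seats k 0 = 0))).foldl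
      (fun acc i =>
        (PySem.List.pyRange (i + 1) N 1).foldl
          (fun acc2 j =>
            if PySem.List.pyGetD (PySem.List.pySetD seats i 1) j 0 = 0 then
              match pvCalcMin N (PySem.List.pySetD (PySem.List.pySetD seats i 1) j 1) with
              | some c => max acc2 c
              | none => acc2
            else acc2)
          acc)
      acc
    = pvAltLoop (pvOnesOf N seats) acc
        ((PySem.List.pyRange a N 1).filter (fun k => decide (PySem.List.pyGetD seats k 0 = 0))) := by
  intro n
  induction n using Nat.strong_induction_on with
  | _ n ih =>
    intro a ha0 hn acc
    cases hfl : (PySem.List.pyRange a N 1).filter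
        (fun k => decide (PySem.List.pyGetD seats k 0 = 0)) with
    | nil => rfl
    | cons i rest =>
      obtain ⟨hai, hiN, hpi, hrest⟩ :=
        pvFilterRange_cons _ (N - a).toNat a N i rest rfl hfl
      have hsi : PySem.List.pyGetD seats i 0 = 0 := by simpa using hpi
      simp only [List.foldl_cons]
      rw [pvAltLoop_cons]
      have h2 : ∀ acc' : Int,
          rest.foldl
            (fun acc i =>
              (PySem.List.pyRange (i + 1) N 1).foldl
                (fun acc2 j =>
                  if PySem.List.pyGetD (PySem.List.pySetD seats i 1) j 0 = 0 then
                    match pvCalcMin N (PySem.List.pySetD (PySem.List.pySetD seats i 1) j 1) with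
                    | some c => max acc2 c
                    | none => acc2
                  else acc2)
                acc)
            acc'
          = pvAltLoop (pvOnesOf N seats) acc' rest := by
        intro acc'
        rw [hrest]
        exact ih (N - (i + 1)).toNat (by omega) (i + 1) (by omega) rfl acc'
      rw [h2]
      have h3 :
          (PySem.List.pyRange (i + 1) N 1).foldl
            (fun acc2 j =>
              if PySem.List.pyGetD (PySem.List.pySetD seats i 1) j 0 = 0 then
                match pvCalcMin N (PySem.List.pySetD (PySem.List.pySetD seats i 1) j 1) with
                | some c => max acc2 c
                | none => acc2
              else acc2)
            acc
          = rest.foldl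
              (fun b j =>
                let d := pvMinGap (pvInsertSorted (pvInsertSorted (pvOnesOf N seats) i) j)
                if d > b then d else b)
              acc := by
        rw [hrest]
        exact pvInner seats N i hlen (ha0.trans hai) hiN hsi acc
      rw [h3]

-- ===== VERDICT (by name: the statement is the Claim_ definition above) =====
theorem max_distance_two_people_spec : Claim_equal_max_distance_two_people := by
  intro N seats _ hpre
  unfold Spec_max_distance_two_people max_distance_two_people max_distance_two_people_alt
  refine Eq.trans
    (PySem.List.foldl_ite_eq_foldl_filter
      (fun i => PySem.List.pyGetD seats i 0 = 0)
      (fun acc i =>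
        (PySem.List.pyRange (i + 1) N 1).foldl
          (fun acc2 j =>
            if PySem.List.pyGetD (PySem.List.pySetD seats i 1) j 0 = 0 then
              match pvCalcMin N (PySem.List.pySetD (PySem.List.pySetD seats i 1) j 1) with
              | some c => max acc2 c
              | none => acc2
            else acc2)
          acc)
      (PySem.List.pyRange 0 N 1) 0) ?_
  exact pvMainLoop seats N hpre (N - 0).toNat 0 (le_refl 0) rfl 0
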